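-- pv_equiv track=rewrite | github.com/PingPingE/Algorithm | Programmers/DBFS/네트워크.py | solution
-- ===== SOURCE A (Python) =====
-- from collections import Counter
-- from collections import Counter
-- from collections import Counter
-- from collections import Counter
--
-- def solution(n, computers):
--     links = {i:i for i in range(n)}
--     for i in range(n):
--         for j in range(i):
--             if computers[i][j]:
--                 links[i]= min(links[j],links[i])
--                 break
--     return len(Counter(links.values()))
-- ===== SOURCE B (Python) =====
-- def solution(n, computers):
--     # Each node adopts the label of its first lower-indexed neighbour, so the
--     # number of distinct labels equals the number of "root" rows with no
--     # earlier connection.  Same entries are touched (short-circuit) as A's break.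
--     return sum(1 for i in range(n)
--                if all(not computers[i][j] for j in range(i)))
-- ===== Notes on version B (the rewrite author's own statement) =====
-- stated objective: simpler
-- what changed: B drops the links dict, the min-propagation and the Counter entirely: since every node just copies its first lower-indexed neighbour's label, the distinct-label count equals the number of rows with no earlier connection, so B counts those rows in one short-circuit pass.
-- outside the precondition, e.g. on solution(3, [[], [1], [1]]): A returns 1, B returns 1
import Mathlib
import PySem

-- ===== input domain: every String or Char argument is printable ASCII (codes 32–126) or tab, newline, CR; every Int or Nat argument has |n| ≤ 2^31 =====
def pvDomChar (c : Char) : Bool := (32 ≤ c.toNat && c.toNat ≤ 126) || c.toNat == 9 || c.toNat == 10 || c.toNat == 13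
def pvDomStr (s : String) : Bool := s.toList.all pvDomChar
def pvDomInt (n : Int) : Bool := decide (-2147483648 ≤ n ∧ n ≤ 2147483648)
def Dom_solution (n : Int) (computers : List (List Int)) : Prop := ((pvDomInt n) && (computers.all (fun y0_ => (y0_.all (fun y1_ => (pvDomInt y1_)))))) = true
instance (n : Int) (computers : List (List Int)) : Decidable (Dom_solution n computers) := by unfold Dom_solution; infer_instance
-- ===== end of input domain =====

-- B drops the links dict / min-propagation / Counter and just counts the rows with no
-- earlier connection (the chain roots), touching the same matrix entries; same return value.

-- ===== PORT A =====
-- computers[i][j] as the Python reads it (total via defaults; Pre_ excludes the raising reads)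
def entryAt (computers : List (List Int)) (i j : Int) : Int :=
  ((PySem.List.pyGet? ((PySem.List.pyGet? computers i).getD []) j).getD 0)

-- 'for j in range(i): if computers[i][j]: links[i] = min(links[j], links[i]); break'
def linkScan (computers : List (List Int)) (i : Int) :
    PySem.Dict Int Int → List Int → PySem.Dict Int Int
  | links, [] => links
  | links, j :: js =>
    if entryAt computers i j ≠ 0 then
      links.insert i (min (links.getD j 0) (links.getD i 0))
    else linkScan computers i links js

def solution (n : Int) (computers : List (List Int)) : Int :=
  let links : PySem.Dict Int Int :=
    (PySem.List.pyRange 0 n 1).foldl (fun d i => d.insert i i) PySem.Dict.empty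
  let links := (PySem.List.pyRange 0 n 1).foldl
    (fun d i => linkScan computers i d (PySem.List.pyRange 0 i 1)) links
  ((PySem.Dict.counter links.values).size : Int)

-- ===== PORT B =====
-- 'all(not computers[i][j] for j in range(i))' (short-circuit)
def noEarlierLink (computers : List (List Int)) (i : Int) : List Int → Bool
  | [] => true
  | j :: js =>
    if entryAt computers i j ≠ 0 then false else noEarlierLink computers i js

def solution_alt (n : Int) (computers : List (List Int)) : Int :=
  (PySem.List.pyRange 0 n 1).foldl
    (fun c i => if noEarlierLink computers i (PySem.List.pyRange 0 i 1) then c + 1 else c) 0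

-- ===== PRECONDITION & SPEC =====
-- Pre_ excludes inputs on which row i (1 ≤ i < n) is missing or shorter than i: there the
-- Python A raises IndexError unless an earlier truthy entry happens to break the scan first
-- (one such still-returning excluded input is cited in claim.json).
def Pre_solution (n : Int) (computers : List (List Int)) : Prop :=
  (2 ≤ n → n ≤ (computers.length : Int)) ∧
  ∀ i < min n.toNat computers.length, 1 ≤ i → i ≤ (computers.getD i []).length
instance (n : Int) (computers : List (List Int)) : Decidable (Pre_solution n computers) := by
  unfold Pre_solution; infer_instance

def pvWitness_solution : Int × List (List Int) := (2, [[0], [1, 1]])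

def Spec_solution (n : Int) (computers : List (List Int)) (out : Int) : Prop := out = solution_alt n computers
instance (n : Int) (computers : List (List Int)) (out : Int) : Decidable (Spec_solution n computers out) := by unfold Spec_solution; infer_instance

-- ===== CLAIM (what is proved, stated in full; the proofs are below) =====
def Claim_equal_solution : Prop := ∀ (n : Int) (computers : List (List Int)), Dom_solution n computers → Pre_solution n computers → Spec_solution n computers (solution n computers)

-- ===== LEMMAS AND PROOFS =====

-- the first j < i with computers[i][j] truthy, over Nat indices
def firstLink (c : List (List Int)) (i : Nat) : Option Nat :=
  (List.range i).find? (fun j => decide (entryAt c (i : Int) (j : Int) ≠ 0))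

-- 'i is a chain root': no truthy entry before the diagonal
def isRoot (c : List (List Int)) (i : Nat) : Bool := (firstLink c i).isNone

-- the label node i ends up with
def lab (c : List (List Int)) : Nat → Int := fun i =>
  match h : firstLink c i with
  | some j => lab c j
  | none => (i : Int)
termination_by i => i
decreasing_by
  exact List.mem_range.mp (List.mem_of_find?_eq_some h)

theorem lab_of_firstLink_some (c : List (List Int)) (i j : Nat) (h : firstLink c i = some j) :
    lab c i = lab c j := by
  rw [lab, h]

theorem lab_of_isRoot (c : List (List Int)) (i : Nat) (h : isRoot c i = true) :
    lab c i = (i : Int) := by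
  rw [lab]
  cases hf : firstLink c i with
  | none => rfl
  | some j => rw [isRoot, hf] at h; simp at h

theorem firstLink_lt (c : List (List Int)) (i j : Nat) (h : firstLink c i = some j) : j < i :=
  List.mem_range.mp (List.mem_of_find?_eq_some h)

-- every label is a root index ≤ i
theorem lab_root (c : List (List Int)) (i : Nat) :
    ∃ r : Nat, lab c i = (r : Int) ∧ r ≤ i ∧ isRoot c r = true := by
  induction i using Nat.strong_induction_on with
  | _ i ih =>
    cases hf : firstLink c i with
    | none =>
      exact ⟨i, lab_of_isRoot c i (by simp [isRoot, hf]), le_refl i, by simp [isRoot, hf]⟩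
    | some j =>
      obtain ⟨r, hr1, hr2, hr3⟩ := ih j (firstLink_lt c i j hf)
      exact ⟨r, by rw [lab_of_firstLink_some c i j hf, hr1],
        le_of_lt (lt_of_le_of_lt hr2 (firstLink_lt c i j hf)), hr3⟩

theorem lab_le (c : List (List Int)) (i : Nat) : lab c i ≤ (i : Int) := by
  obtain ⟨r, h1, h2, _⟩ := lab_root c i
  rw [h1]; exact_mod_cast h2

-- the set of labels of 0..N-1 is exactly the (cast) list of roots, in order
theorem set_labels (c : List (List Int)) (N : Nat) :
    PySem.Set.ofList ((List.range N).map (lab c)) =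
      ((List.range N).filter (isRoot c)).map (fun r : Nat => (r : Int)) := by
  induction N with
  | zero => rfl
  | succ N ih =>
    rw [List.range_succ, List.map_append, PySem.Set.ofList_eq_foldl, List.foldl_append,
      ← PySem.Set.ofList_eq_foldl, List.filter_append]
    simp only [List.map_cons, List.map_nil, List.foldl_cons, List.foldl_nil, ih]
    cases hr : isRoot c N with
    | true =>
      -- lab N = N is new: all earlier roots are < N
      have hc : PySem.Set.contains
          ((List.filter (isRoot c) (List.range N)).map (fun r : Nat => (r : Int))) (lab c N) = false := by
        rw [← Bool.not_eq_true, PySem.Set.contains_iff]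
        intro hmem
        obtain ⟨r, hrmem, hre⟩ := List.mem_map.mp hmem
        have hrN : r < N := List.mem_range.mp (List.mem_of_mem_filter hrmem)
        rw [lab_of_isRoot c N hr] at hre
        omega
      show PySem.Set.add _ _ = _
      rw [PySem.Set.add, hc]
      simp [lab_of_isRoot c N hr, hr]
    | false =>
      -- lab N = lab j for some j < N, already present
      have hmem : (lab c N) ∈ ((List.filter (isRoot c) (List.range N)).map (fun r : Nat => (r : Int))) := by
        obtain ⟨r, h1, h2, h3⟩ := lab_root c N
        have hrN : r < N := by
          rcases Nat.lt_or_ge r N with h | h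
          · exact h
          · have heq : r = N := le_antisymm h2 h
            rw [heq] at h3; rw [h3] at hr; cases hr
        exact List.mem_map.mpr ⟨r, List.mem_filter.mpr ⟨List.mem_range.mpr hrN, h3⟩, h1.symm⟩
      show PySem.Set.add _ _ = _
      rw [PySem.Set.add, if_pos ((PySem.Set.contains_iff _ _).mpr hmem)]
      simp [hr]

-- B's inner scan is the find?-isNone of the same predicate
theorem noEarlierLink_eq_find (c : List (List Int)) (i : Int) (l : List Int) :
    noEarlierLink c i l = (l.find? (fun j => decide (entryAt c i j ≠ 0))).isNone := by
  induction l with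
  | nil => rfl
  | cons j js ih =>
    by_cases h : entryAt c i j ≠ 0 <;> simp [noEarlierLink, h, ih]

theorem pyRange_zero_cast (k : Nat) :
    PySem.List.pyRange 0 (k : Int) 1 = (List.range k).map (fun t : Nat => (t : Int)) := by
  simpa using PySem.List.pyRange_zero_nat k

theorem find_pyRange (c : List (List Int)) (k : Nat) :
    (PySem.List.pyRange 0 (k : Int) 1).find? (fun j => decide (entryAt c (k : Int) j ≠ 0))
      = (firstLink c k).map (fun t : Nat => (t : Int)) := by
  rw [pyRange_zero_cast, List.find?_map]
  rfl

theorem noEarlierLink_eq_isRoot (c : List (List Int)) (k : Nat) :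
    noEarlierLink c (k : Int) (PySem.List.pyRange 0 (k : Int) 1) = isRoot c k := by
  rw [noEarlierLink_eq_find, find_pyRange, isRoot]
  cases firstLink c k <;> rfl

-- A's inner scan, on a dict that stores lab at every j in l
theorem linkScan_eq (c : List (List Int)) (i : Int) (d : PySem.Dict Int Int) (l : List Int)
    (hl : ∀ j ∈ l, 0 ≤ j ∧ d.getD j 0 = lab c j.toNat) :
    linkScan c i d l =
      match l.find? (fun j => decide (entryAt c i j ≠ 0)) with
      | some j => d.insert i (min (lab c j.toNat) (d.getD i 0))
      | none => d := by
  induction l with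
  | nil => rfl
  | cons j js ih =>
    by_cases h : entryAt c i j ≠ 0
    · have hj := hl j (List.mem_cons_self)
      simp [linkScan, h, hj.2]
    · have : ∀ j' ∈ js, 0 ≤ j' ∧ d.getD j' 0 = lab c j'.toNat :=
        fun j' hj' => hl j' (List.mem_cons_of_mem j hj')
      simp [linkScan, h, ih this]

-- the initial dict {i:i for i in range(n)}
theorem init_items (n : Int) :
    ((PySem.List.pyRange 0 n 1).foldl (fun d i => d.insert i i) PySem.Dict.empty).items
      = (PySem.List.pyRange 0 n 1).map (fun i => (i, i)) := by
  have := PySem.Dict.items_foldl_insert_fresh (PySem.List.pyRange 0 n 1)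
    (fun i : Int => i) (fun i : Int => i) PySem.Dict.empty
    (fun a _ => PySem.Dict.contains_empty a)
    (by simpa using PySem.List.nodup_pyRange_one 0 n)
  simpa using this

theorem init_keys (n : Int) :
    ((PySem.List.pyRange 0 n 1).foldl (fun d i => d.insert i i) PySem.Dict.empty).keys
      = PySem.List.pyRange 0 n 1 := by
  rw [PySem.Dict.keys, init_items, List.map_map]
  exact List.map_id' (PySem.List.pyRange 0 n 1)

theorem init_getD (n : Int) (m : Int) :
    ((PySem.List.pyRange 0 n 1).foldl (fun d i => d.insert i i) PySem.Dict.empty).getD m 0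
      = if 0 ≤ m ∧ m < n then m else 0 := by
  by_cases h : 0 ≤ m ∧ m < n
  · rw [if_pos h]
    apply PySem.Dict.getD_of_mem_items
    · rw [init_items]
      exact List.mem_map.mpr ⟨m, PySem.List.mem_pyRange_one.mpr h, rfl⟩
    · rw [init_keys]; exact PySem.List.nodup_pyRange_one 0 n
  · rw [if_neg h]
    apply PySem.Dict.getD_of_not_contains
    rw [← Bool.not_eq_true, PySem.Dict.contains_iff_mem_keys, init_keys]
    intro hmem
    exact h (PySem.List.mem_pyRange_one.mp hmem)

-- A's dict after the first k outer iterations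
def dictAfter (c : List (List Int)) (n : Int) (k : Nat) : PySem.Dict Int Int :=
  (PySem.List.pyRange 0 (k : Int) 1).foldl
    (fun d i => linkScan c i d (PySem.List.pyRange 0 i 1))
    ((PySem.List.pyRange 0 n 1).foldl (fun d i => d.insert i i) PySem.Dict.empty)

-- loop invariant of A's outer loop
theorem dictAfter_inv (c : List (List Int)) (n : Int) (k : Nat) (hk : k ≤ n.toNat) :
    (dictAfter c n k).keys = PySem.List.pyRange 0 n 1 ∧
    ∀ m : Int, (dictAfter c n k).getD m 0 =
      if 0 ≤ m ∧ m < (k : Int) then lab c m.toNat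
      else if 0 ≤ m ∧ m < n then m else 0 := by
  induction k with
  | zero =>
    constructor
    · rw [dictAfter]
      simpa using init_keys n
    · intro m
      have h0 : dictAfter c n 0
          = (PySem.List.pyRange 0 n 1).foldl (fun d i => d.insert i i) PySem.Dict.empty := by
        rw [dictAfter]; rfl
      rw [h0, init_getD n m,
        if_neg (show ¬(0 ≤ m ∧ m < ((0 : Nat) : Int)) by simp only [Nat.cast_zero]; omega)]
  | succ k ih =>
    obtain ⟨ihk, ihg⟩ := ih (Nat.le_of_succ_le hk)
    have hkn : (k : Int) < n := by omega
    have hstep : dictAfter c n (k + 1)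
        = linkScan c (k : Int) (dictAfter c n k) (PySem.List.pyRange 0 (k : Int) 1) := by
      rw [dictAfter, dictAfter, show ((k + 1 : Nat) : Int) = (k : Int) + 1 by push_cast; ring,
        PySem.List.pyRange_one_succ_right (by positivity), List.foldl_append]
      rfl
    have hl : ∀ j ∈ PySem.List.pyRange 0 (k : Int) 1,
        0 ≤ j ∧ (dictAfter c n k).getD j 0 = lab c j.toNat := by
      intro j hj
      obtain ⟨h0, h1⟩ := PySem.List.mem_pyRange_one.mp hj
      exact ⟨h0, by rw [ihg j, if_pos ⟨h0, h1⟩]⟩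
    have hgk : (dictAfter c n k).getD (k : Int) 0 = (k : Int) := by
      rw [ihg, if_neg (by omega), if_pos ⟨by positivity, hkn⟩]
    rw [hstep, linkScan_eq c (k : Int) _ _ hl, find_pyRange]
    cases hf : firstLink c k with
    | some j =>
      have hjk : j < k := firstLink_lt c k j hf
      have hmin : min (lab c ((j : Int)).toNat) ((dictAfter c n k).getD (k : Int) 0) = lab c k := by
        rw [hgk, lab_of_firstLink_some c k j hf]
        simp only [Int.toNat_natCast]
        exact min_eq_left (le_trans (lab_le c j) (by exact_mod_cast Nat.le_of_lt hjk))
      simp only [Option.map_some, hmin]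
      constructor
      · rw [PySem.Dict.keys_insert_of_contains _ _ (by
          rw [PySem.Dict.contains_iff_mem_keys, ihk]
          exact PySem.List.mem_pyRange_one.mpr ⟨by positivity, hkn⟩)]
        exact ihk
      · intro m
        rw [PySem.Dict.getD_insert]
        by_cases hm : m = (k : Int)
        · rw [if_pos hm, hm, if_pos ⟨by positivity, by push_cast; omega⟩]
          simp
        · rw [if_neg hm, ihg m]
          have : (0 ≤ m ∧ m < ((k : Int) + 1)) ↔ (0 ≤ m ∧ m < (k : Int)) := by omega
          rw [show ((k + 1 : Nat) : Int) = (k : Int) + 1 by push_cast; ring]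
          by_cases h0 : 0 ≤ m ∧ m < (k : Int)
          · rw [if_pos h0, if_pos (this.mpr h0)]
          · rw [if_neg h0, if_neg (fun hx => h0 (this.mp hx))]
    | none =>
      simp only [Option.map_none]
      refine ⟨ihk, fun m => ?_⟩
      rw [ihg m, show ((k + 1 : Nat) : Int) = (k : Int) + 1 by push_cast; ring]
      by_cases hm : m = (k : Int)
      · rw [hm, if_neg (by omega), if_pos ⟨by positivity, hkn⟩,
          if_pos ⟨by positivity, by omega⟩]
        simp [Int.toNat_natCast, lab_of_isRoot c k (by simp [isRoot, hf])]
      · have : (0 ≤ m ∧ m < ((k : Int) + 1)) ↔ (0 ≤ m ∧ m < (k : Int)) := by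
          constructor <;> (intro h; exact ⟨h.1, by omega⟩)
        by_cases h0 : 0 ≤ m ∧ m < (k : Int)
        · rw [if_pos h0, if_pos (this.mpr h0)]
        · rw [if_neg h0, if_neg (fun hx => h0 (this.mp hx))]

-- A's final dict holds exactly the labels, in index order
theorem values_final (c : List (List Int)) (n : Int) :
    (dictAfter c n n.toNat).values = (List.range n.toNat).map (lab c) := by
  obtain ⟨hk, hg⟩ := dictAfter_inv c n n.toNat (le_refl _)
  rw [PySem.Dict.values_eq_map_keys _ (by rw [hk]; exact PySem.List.nodup_pyRange_one 0 n) 0,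
    hk, PySem.List.pyRange_zero n, List.map_map]
  apply List.map_congr_left
  intro i hi
  have hiN : i < n.toNat := List.mem_range.mp hi
  simp only [Function.comp_apply]
  rw [hg, if_pos ⟨by positivity, by exact_mod_cast hiN⟩]
  simp

-- ===== VERDICT (by name: the statement is the Claim_ definition above) =====
theorem solution_spec : Claim_equal_solution := by
  intro n c _ _
  show solution n c = solution_alt n c
  -- A's side: distinct labels = roots
  have hA : solution n c = ((((List.range n.toNat).filter (isRoot c)).length : Nat) : Int) := by
    rw [solution]
    have hfold : (PySem.List.pyRange 0 n 1).foldl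
        (fun d i => linkScan c i d (PySem.List.pyRange 0 i 1))
        ((PySem.List.pyRange 0 n 1).foldl (fun d i => d.insert i i) PySem.Dict.empty)
        = dictAfter c n n.toNat := by
      rw [dictAfter, PySem.List.pyRange_zero n, pyRange_zero_cast]
    rw [hfold, values_final, PySem.Dict.size, PySem.Dict.items_counter, List.length_map,
      set_labels, List.length_map]
  -- B's side: count of roots
  have hpred : ((fun i => noEarlierLink c i (PySem.List.pyRange 0 i 1)) ∘ fun k : Nat => (k : Int))
      = isRoot c := by
    funext i
    simp only [Function.comp_apply]
    exact noEarlierLink_eq_isRoot c i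
  rw [hA, solution_alt, PySem.List.foldl_count_if, PySem.List.pyRange_zero n, List.countP_map,
    hpred, List.countP_eq_length_filter, zero_add]
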